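-- pv_equiv track=rewrite | github.com/pml68/feladatok | otszaz/otszaz.py | fizetendo
-- ===== SOURCE A (Python) =====
-- def fizetendo(darabszam) -> int:
--     ar_per_darab = 500
--     ar = 0
--     for i in range(darabszam):
--         if ar_per_darab > 400:
--             ar += ar_per_darab
--             ar_per_darab -= 50
--         else:
--             ar += ar_per_darab
--     return ar
-- ===== SOURCE B (Python) =====
-- def fizetendo(darabszam) -> int:
--     # Closed form: items cost 500, 450, then 400 each.
--     if darabszam <= 0:
--         return 0
--     if darabszam == 1:
--         return 500
--     return 950 + 400 * (darabszam - 2)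
-- ===== Notes on version B (the rewrite author's own statement) =====
-- stated objective: faster
-- what changed: Replaced the per-item loop (price 500, 450, then 400 each) by a closed-form case split on the item count.
import Mathlib
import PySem

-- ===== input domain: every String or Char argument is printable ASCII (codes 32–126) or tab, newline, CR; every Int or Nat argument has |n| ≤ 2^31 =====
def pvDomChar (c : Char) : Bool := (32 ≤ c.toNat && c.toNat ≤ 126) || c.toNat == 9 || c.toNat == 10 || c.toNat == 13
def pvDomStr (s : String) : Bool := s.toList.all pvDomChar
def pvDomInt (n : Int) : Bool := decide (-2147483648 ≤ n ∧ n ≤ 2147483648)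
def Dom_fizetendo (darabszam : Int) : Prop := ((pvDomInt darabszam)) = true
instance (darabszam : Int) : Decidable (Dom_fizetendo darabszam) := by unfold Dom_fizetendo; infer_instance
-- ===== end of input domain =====

-- B replaces A's per-item loop with a closed-form case split on the item count (O(1) vs O(n)).


-- ===== PORT A =====
-- literal port of A: fold over range(darabszam) carrying (ar_per_darab, ar)
def fizetendo (darabszam : Int) : Int :=
  let st := (PySem.List.pyRange 0 darabszam 1).foldl
    (fun (s : Int × Int) (_i : Int) =>
      if s.1 > 400 then (s.1 - 50, s.2 + s.1) else (s.1, s.2 + s.1))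
    (500, 0)
  st.2

-- ===== PORT B =====
def fizetendo_alt (darabszam : Int) : Int :=
  if darabszam ≤ 0 then 0
  else if darabszam = 1 then 500
  else 950 + 400 * (darabszam - 2)

-- ===== PRECONDITION & SPEC =====
def Spec_fizetendo (darabszam : Int) (out : Int) : Prop := out = fizetendo_alt darabszam
instance (darabszam : Int) (out : Int) : Decidable (Spec_fizetendo darabszam out) := by unfold Spec_fizetendo; infer_instance

-- ===== CLAIM (what is proved, stated in full; the proofs are below) =====
def Claim_equal_fizetendo : Prop := ∀ (darabszam : Int), Dom_fizetendo darabszam → Spec_fizetendo darabszam (fizetendo darabszam)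

-- ===== LEMMAS AND PROOFS =====

-- once the price has dropped to 400, every further step just adds 400
theorem pv_fold_const (l : List Int) (ar : Int) :
    l.foldl (fun (s : Int × Int) (_i : Int) =>
      if s.1 > 400 then (s.1 - 50, s.2 + s.1) else (s.1, s.2 + s.1)) (400, ar)
    = (400, ar + 400 * l.length) := by
  induction l generalizing ar with
  | nil => simp
  | cons x xs ih =>
      simp only [List.foldl_cons]
      norm_num
      rw [ih]
      simp only [Prod.mk.injEq]
      refine ⟨trivial, ?_⟩
      ring

theorem fizetendo_spec : Claim_equal_fizetendo := by
  intro n _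
  unfold Spec_fizetendo fizetendo fizetendo_alt
  rcases (by omega : n ≤ 0 ∨ 0 < n) with h | h
  · rw [PySem.List.pyRange_one]
    rw [show (n - 0).toNat = 0 by omega]
    simp [h]
  · rcases (by omega : n = 1 ∨ 1 < n) with h1 | h1
    · rw [PySem.List.pyRange_one_cons (by omega)]
      rw [h1, PySem.List.pyRange_one]
      norm_num
    · rw [PySem.List.pyRange_one_cons (by omega), PySem.List.pyRange_one_cons (by omega)]
      simp only [List.foldl_cons]
      norm_num
      rw [pv_fold_const]
      rw [PySem.List.length_pyRange_one]
      rw [if_neg (by omega : ¬ n ≤ 0), if_neg (by omega : ¬ n = 1)]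
      omega
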